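-- pv_equiv track=rewrite | github.com/basfl/python2 | folder.py | folder
-- ===== SOURCE A (Python) =====
-- def folder(l):
--     n=len(l);
--     d=[];
--     flag=True;
--     while flag==True:
--         first=l.pop(0);
--         last=l.pop(n-2);
--         d.append(first+last);
--         n=len(l);
--         if(n==1):
--             d.append(l.pop(0));
--             flag=False;
--         elif (n==0):
--             flag=False;
--     return(d);
-- ===== SOURCE B (Python) =====
-- def folder(l):
--     d = []
--     i, j = 0, len(l) - 1
--     while i < j:
--         d.append(l[i] + l[j])
--         i += 1
--         j -= 1
--     if i == j:
--         d.append(l[i])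
--     return d
-- ===== Notes on version B (the rewrite author's own statement) =====
-- stated objective: faster
-- what changed: Replaces the destructive pop(0)/pop(n-2) loop (each pop(0) shifts the whole remaining list) with a non-mutating two-pointer index scan over the original list.
import Mathlib
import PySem

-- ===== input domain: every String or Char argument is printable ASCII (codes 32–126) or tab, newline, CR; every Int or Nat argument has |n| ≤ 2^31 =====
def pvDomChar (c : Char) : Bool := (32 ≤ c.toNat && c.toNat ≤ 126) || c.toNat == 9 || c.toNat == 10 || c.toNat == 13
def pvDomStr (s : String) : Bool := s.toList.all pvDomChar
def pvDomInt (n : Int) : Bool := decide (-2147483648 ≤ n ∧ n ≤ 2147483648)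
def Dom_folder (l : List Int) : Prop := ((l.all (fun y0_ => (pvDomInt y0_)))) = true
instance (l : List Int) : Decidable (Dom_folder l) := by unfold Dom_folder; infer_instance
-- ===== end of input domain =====

-- B replaces A's destructive pop(0)/pop(n-2) loop with a non-mutating two-pointer
-- index scan (A empties its list argument in place; B leaves it untouched — the
-- equivalence proved here is about the return value only).

-- ===== PORT A =====
-- A's while loop; state: current list l, accumulator d, Python variable n.
-- Where a pop raises IndexError in Python the port returns d (excluded by Pre_).
def folderLoop (l : List Int) (d : List Int) (n : Int) : List Int :=
  match h1 : PySem.List.pop? l 0 with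
  | none => d
  | some (first, l1) =>
    match h2 : PySem.List.pop? l1 (n - 2) with
    | none => d
    | some (last, l2) =>
      let d' := d ++ [first + last]
      let n' : Int := l2.length
      if n' = 1 then
        match PySem.List.pop? l2 0 with
        | some (mid, _) => d' ++ [mid]
        | none => d'
      else if n' = 0 then d'
      else folderLoop l2 d' n'
termination_by l.length
decreasing_by
  have e1 := PySem.List.length_of_pop?_eq_some l h1
  have e2 := PySem.List.length_of_pop?_eq_some l1 h2
  simp only [] at e1 e2
  omega

def folder (l : List Int) : List Int := folderLoop l [] l.length

-- ===== PORT B =====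
-- Source B's two-pointer while loop over the untouched list
def folderAltLoop (l : List Int) (i j : Int) (d : List Int) : List Int :=
  if _h : i < j then
    match PySem.List.pyGet? l i, PySem.List.pyGet? l j with
    | some a, some b => folderAltLoop l (i + 1) (j - 1) (d ++ [a + b])
    | _, _ => d
  else if i = j then
    match PySem.List.pyGet? l i with
    | some a => d ++ [a]
    | none => d
  else d
termination_by (j - i).toNat
decreasing_by omega

def folder_alt (l : List Int) : List Int := folderAltLoop l 0 ((l.length : Int) - 1) []

-- ===== PRECONDITION & SPEC =====
-- A raises IndexError on lists of length 0 or 1 (its pops run before any length test)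
def Pre_folder (l : List Int) : Prop := 2 ≤ l.length
instance (l : List Int) : Decidable (Pre_folder l) := by unfold Pre_folder; infer_instance
def pvWitness_folder : List Int := ([1, 2, 3])

def Spec_folder (l : List Int) (out : List Int) : Prop := out = folder_alt l
instance (l : List Int) (out : List Int) : Decidable (Spec_folder l out) := by unfold Spec_folder; infer_instance

-- ===== CLAIM (what is proved, stated in full; the proofs are below) =====
def Claim_equal_folder : Prop := ∀ (l : List Int), Dom_folder l → Pre_folder l → Spec_folder l (folder l)

-- ===== LEMMAS AND PROOFS =====

-- clean reference: pair the two ends inward, keep the middle element if any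
def pairSpec : List Int → List Int
  | [] => []
  | [a] => [a]
  | a :: b :: rest =>
      (a + ((b :: rest).getLast?.getD 0)) :: pairSpec ((b :: rest).dropLast)
termination_by l => l.length
decreasing_by simp

theorem pairSpec_nil : pairSpec [] = [] := by rw [pairSpec.eq_def]

theorem pairSpec_single (a : Int) : pairSpec [a] = [a] := by rw [pairSpec.eq_def]

theorem pairSpec_cons_concat (a b : Int) (m : List Int) :
    pairSpec (a :: (m ++ [b])) = (a + b) :: pairSpec m := by
  cases m with
  | nil => rw [pairSpec.eq_def]; simp [pairSpec_nil]
  | cons c m' =>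
    rw [pairSpec.eq_def]
    have h1 : (c :: (m' ++ [b])).getLast? = some b := by
      rw [show c :: (m' ++ [b]) = (c :: m') ++ [b] by simp]
      exact List.getLast?_concat
    have h2 : (c :: (m' ++ [b])).dropLast = c :: m' := by
      rw [show c :: (m' ++ [b]) = (c :: m') ++ [b] by simp]
      exact List.dropLast_concat
    simp [h1, h2]

theorem eraseIdx_concat_length {α : Type} (m : List α) (b : α) :
    (m ++ [b]).eraseIdx m.length = m := by
  induction m with
  | nil => simp
  | cons x xs ih => simpa [List.eraseIdx] using ih

theorem loopA_eq (k : Nat) : ∀ (l d : List Int), l.length = k → 2 ≤ k →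
    folderLoop l d (l.length : Int) = d ++ pairSpec l := by
  induction k using Nat.strong_induction_on with
  | _ k ih =>
    intro l d hlen hk
    match l with
    | [] => simp at hlen; omega
    | a :: t =>
      rcases t.eq_nil_or_concat with rfl | ⟨m, b, rfl⟩
      · simp at hlen; omega
      · simp only [List.concat_eq_append] at hlen ⊢
        have hp1 : PySem.List.pop? (a :: (m ++ [b])) 0 = some (a, m ++ [b]) :=
          PySem.List.pop?_zero_cons _ _
        have hidx : ((a :: (m ++ [b])).length : Int) - 2 = ((m.length : Nat) : Int) := by
          simp; omega
        have hp2 : PySem.List.pop? (m ++ [b]) ((m.length : Nat) : Int) = some (b, m) := by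
          have h := PySem.List.pop?_natCast (m ++ [b]) m.length (by simp)
          simpa [eraseIdx_concat_length] using h
        rw [folderLoop.eq_def]
        split
        · next h => rw [hp1] at h; cases h
        · next first l1 h =>
          rw [hp1] at h
          simp only [Option.some.injEq, Prod.mk.injEq] at h
          obtain ⟨rfl, rfl⟩ := h
          rw [hidx]
          split
          · next h2 => rw [hp2] at h2; cases h2
          · next last l2 h2 =>
            rw [hp2] at h2
            simp only [Option.some.injEq, Prod.mk.injEq] at h2
            obtain ⟨rfl, rfl⟩ := h2
            rw [pairSpec_cons_concat]
            match m with
            | [] => simp [pairSpec_nil]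
            | [x] => simp [PySem.List.pop?_zero_cons, pairSpec_single]
            | x :: y :: m'' =>
              rw [if_neg (by simp only [List.length_cons]; push_cast; omega),
                  if_neg (by simp only [List.length_cons]; push_cast; omega)]
              rw [ih (x :: y :: m'').length (by simp at hlen ⊢; omega)
                    (x :: y :: m'') (d ++ [a + b]) rfl (by simp)]
              simp

theorem toNat_add_one {i : Int} (h : 0 ≤ i) : (i + 1).toNat = i.toNat + 1 := by omega

theorem shiftB (a b : Int) (m : List Int) (i j : Int) (d : List Int)
    (hi : 0 ≤ i) (hj : j < (m.length : Int)) :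
    folderAltLoop (a :: (m ++ [b])) (i + 1) (j + 1) d = folderAltLoop m i j d := by
  by_cases hlt : i < j
  · have hj0 : 0 ≤ j := by omega
    have hiL : i.toNat < m.length := by omega
    have hjL : j.toNat < m.length := by omega
    have gi : PySem.List.pyGet? (a :: (m ++ [b])) (i + 1) = some m[i.toNat] := by
      rw [PySem.List.pyGet?_of_nonneg _ (by omega), toNat_add_one hi]
      simp [List.getElem?_append_left, hiL]
    have gj : PySem.List.pyGet? (a :: (m ++ [b])) (j + 1) = some m[j.toNat] := by
      rw [PySem.List.pyGet?_of_nonneg _ (by omega), toNat_add_one hj0]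
      simp [List.getElem?_append_left, hjL]
    have gi' : PySem.List.pyGet? m i = some m[i.toNat] := by
      rw [PySem.List.pyGet?_of_nonneg _ hi]; simp [hiL]
    have gj' : PySem.List.pyGet? m j = some m[j.toNat] := by
      rw [PySem.List.pyGet?_of_nonneg _ hj0]; simp [hjL]
    rw [folderAltLoop.eq_def, folderAltLoop.eq_def,
        dif_pos (by omega : i + 1 < j + 1), dif_pos hlt]
    simp only [gi, gj, gi', gj']
    rw [show j + 1 - 1 = (j - 1) + 1 by ring]
    exact shiftB a b m (i + 1) (j - 1) _ (by omega) (by omega)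
  · by_cases heq : i = j
    · subst heq
      have hiL : i.toNat < m.length := by omega
      have gi : PySem.List.pyGet? (a :: (m ++ [b])) (i + 1) = some m[i.toNat] := by
        rw [PySem.List.pyGet?_of_nonneg _ (by omega), toNat_add_one hi]
        simp [List.getElem?_append_left, hiL]
      have gi' : PySem.List.pyGet? m i = some m[i.toNat] := by
        rw [PySem.List.pyGet?_of_nonneg _ hi]; simp [hiL]
      rw [folderAltLoop.eq_def, folderAltLoop.eq_def,
          dif_neg (by omega), dif_neg (by omega), if_pos rfl, if_pos rfl]
      simp only [gi, gi']
    · rw [folderAltLoop.eq_def, folderAltLoop.eq_def,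
          dif_neg (by omega), dif_neg (by omega), if_neg (by omega), if_neg heq]
termination_by (j - i).toNat
decreasing_by omega

theorem loopB_eq (k : Nat) : ∀ (l d : List Int), l.length = k →
    folderAltLoop l 0 ((l.length : Int) - 1) d = d ++ pairSpec l := by
  induction k using Nat.strong_induction_on with
  | _ k ih =>
    intro l d hlen
    match l with
    | [] => rw [folderAltLoop.eq_def]; norm_num [pairSpec_nil]
    | a :: t =>
      rcases t.eq_nil_or_concat with rfl | ⟨m, b, rfl⟩
      · rw [folderAltLoop.eq_def]
        simp [pairSpec_single]
      · simp only [List.concat_eq_append] at hlen ⊢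
        have hlen' : (((a :: (m ++ [b])).length : Nat) : Int) - 1 = (m.length : Int) + 1 := by
          simp
        have g0 : PySem.List.pyGet? (a :: (m ++ [b])) 0 = some a :=
          PySem.List.pyGet?_zero_cons _ _
        have gj : PySem.List.pyGet? (a :: (m ++ [b])) ((m.length : Int) + 1) = some b := by
          have h := PySem.List.pyGet?_append_length (a :: m) ([] : List Int) b
          simpa using h
        rw [folderAltLoop.eq_def, hlen', dif_pos (by omega)]
        simp only [g0, gj]
        rw [show (m.length : Int) + 1 - 1 = ((m.length : Int) - 1) + 1 by ring,
            shiftB a b m 0 ((m.length : Int) - 1) _ le_rfl (by omega),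
            ih m.length (by simp at hlen ⊢; omega) m (d ++ [a + b]) rfl,
            pairSpec_cons_concat]
        simp

-- ===== VERDICT (by name: the statement is the Claim_ definition above) =====
theorem folder_spec : Claim_equal_folder := by
  intro l _ hpre
  unfold Spec_folder folder folder_alt
  rw [loopA_eq l.length l [] rfl hpre, loopB_eq l.length l [] rfl]
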